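-- pv_equiv track=rewrite | github.com/yeseongcho/- | ICT 문제해결기법/PA2/PAeight.py | getting
-- ===== SOURCE A (Python) =====
-- def getting(locate_list, people_list, distance, k, Logic) :
--     index = len(people_list) - 1
--     Max = 0
--     if Logic == True :
--         for j in range(index, 0, -1) :
--             cum = people_list[j]
--             m = j-1
--             while(locate_list[j] - distance <= locate_list[m] + distance) :
--                 cum = cum + people_list[m]
--                 m = m-1
--                 if m == -1 :
--                     break
--             if cum > Max :
--                 Max = cum
--             if people_list[m+1] == people_list[k] :
--                 break
--
--     if Logic == False :
--         for j in range(index, 0, -1) :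
--             cum = people_list[j]
--             m = j-1
--             while(locate_list[j] - distance <= locate_list[m] + distance) :
--                 cum = cum + people_list[m]
--                 m = m-1
--                 if m == -1 :
--                     break
--             if cum > Max :
--                 Max = cum
--     return Max
-- ===== SOURCE B (Python) =====
-- def getting(locate_list, people_list, distance, k, Logic):
--     # Prefix sums: each window sum is one subtraction; the inner loop only
--     # moves an index to the window start; one loop handles both Logic modes.
--     n = len(people_list)
--     pref = [0]
--     s = 0
--     for p in people_list:
--         s += p
--         pref.append(s)
--     best = 0
--     for j in range(n - 1, 0, -1):
--         thresh = locate_list[j] - 2 * distance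
--         lo = j
--         while lo > 0 and locate_list[lo - 1] >= thresh:
--             lo -= 1
--         cum = pref[j + 1] - pref[lo]
--         if cum > best:
--             best = cum
--         if Logic and people_list[lo] == people_list[k]:
--             break
--     return best
-- ===== Notes on version B (the rewrite author's own statement) =====
-- stated objective: alternative
-- what changed: B builds a prefix-sum array once so each window sum is a single subtraction, reduces the inner loop to a bound-checked index search for the window start, and replaces A's two duplicated Logic-branch loops by one loop with a single break condition.
import Mathlib
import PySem

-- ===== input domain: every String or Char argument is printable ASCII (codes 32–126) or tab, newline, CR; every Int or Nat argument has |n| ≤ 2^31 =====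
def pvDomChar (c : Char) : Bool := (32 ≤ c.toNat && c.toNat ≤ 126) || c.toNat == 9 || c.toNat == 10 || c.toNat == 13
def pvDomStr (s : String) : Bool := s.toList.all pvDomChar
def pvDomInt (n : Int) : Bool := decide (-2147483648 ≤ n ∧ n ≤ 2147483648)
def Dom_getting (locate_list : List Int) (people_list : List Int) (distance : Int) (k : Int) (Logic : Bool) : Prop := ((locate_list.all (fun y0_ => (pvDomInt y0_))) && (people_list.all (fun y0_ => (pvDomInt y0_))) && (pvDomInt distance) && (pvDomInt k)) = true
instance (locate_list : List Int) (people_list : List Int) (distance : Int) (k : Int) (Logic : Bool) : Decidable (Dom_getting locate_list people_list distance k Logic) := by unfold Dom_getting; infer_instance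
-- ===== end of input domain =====

-- B: prefix sums + an index-only inner search and a single loop for both Logic modes; same value as A.

-- ===== PORT A =====
-- Python inner 'while': state (cum, m); m is the Nat value of Python's m at the condition check
-- (the loop is only entered with m ≥ 0; on m hitting -1 it breaks). Returns (cum, final m as Int).
def pvWhileA (locate_list people_list : List Int) (lj distance : Int) : Int → Nat → Int × Int
  | cum, 0 =>
    if lj - distance ≤ PySem.List.pyGetD locate_list ((0 : Nat) : Int) 0 + distance then
      (cum + PySem.List.pyGetD people_list ((0 : Nat) : Int) 0, -1)
    else (cum, ((0 : Nat) : Int))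
  | cum, m' + 1 =>
    if lj - distance ≤ PySem.List.pyGetD locate_list ((m' + 1 : Nat) : Int) 0 + distance then
      pvWhileA locate_list people_list lj distance (cum + PySem.List.pyGetD people_list ((m' + 1 : Nat) : Int) 0) m'
    else (cum, ((m' + 1 : Nat) : Int))

-- the Logic == True loop, j descending, with the 'people_list[m+1] == people_list[k]' break
def pvLoopT (locate_list people_list : List Int) (distance k : Int) : Int → Nat → Int
  | Max, 0 => Max
  | Max, j + 1 =>
    let res := pvWhileA locate_list people_list (PySem.List.pyGetD locate_list ((j + 1 : Nat) : Int) 0) distance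
                 (PySem.List.pyGetD people_list ((j + 1 : Nat) : Int) 0) j
    let Max' := if res.1 > Max then res.1 else Max
    if PySem.List.pyGetD people_list (res.2 + 1) 0 == PySem.List.pyGetD people_list k 0 then Max'
    else pvLoopT locate_list people_list distance k Max' j

-- the Logic == False loop (no break)
def pvLoopF (locate_list people_list : List Int) (distance : Int) : Int → Nat → Int
  | Max, 0 => Max
  | Max, j + 1 =>
    let res := pvWhileA locate_list people_list (PySem.List.pyGetD locate_list ((j + 1 : Nat) : Int) 0) distance
                 (PySem.List.pyGetD people_list ((j + 1 : Nat) : Int) 0) j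
    let Max' := if res.1 > Max then res.1 else Max
    pvLoopF locate_list people_list distance Max' j

def getting (locate_list : List Int) (people_list : List Int) (distance : Int) (k : Int) (Logic : Bool) : Int :=
  let index := people_list.length - 1
  if Logic = true then pvLoopT locate_list people_list distance k 0 index
  else pvLoopF locate_list people_list distance 0 index

-- ===== PORT B =====
-- pref = [0]; s = 0; for p in people_list: s += p; pref.append(s)
def pvPref (people_list : List Int) : List Int :=
  (people_list.foldl (fun st p => (st.1 ++ [st.2 + p], st.2 + p)) ([0], 0)).1

-- lo = j; while lo > 0 and locate_list[lo-1] >= thresh: lo -= 1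
def pvFindLo (locate_list : List Int) (thresh : Int) : Nat → Nat
  | 0 => 0
  | lo + 1 => if PySem.List.pyGetD locate_list ((lo : Nat) : Int) 0 ≥ thresh then pvFindLo locate_list thresh lo else lo + 1

-- for j in range(n-1, 0, -1): window start, prefix-difference sum, running best, single break test
def pvLoopB (locate_list people_list pref : List Int) (distance k : Int) (Logic : Bool) : Int → Nat → Int
  | best, 0 => best
  | best, j + 1 =>
    let thresh := PySem.List.pyGetD locate_list ((j + 1 : Nat) : Int) 0 - 2 * distance
    let lo := pvFindLo locate_list thresh (j + 1)
    let cum := PySem.List.pyGetD pref ((j + 2 : Nat) : Int) 0 - PySem.List.pyGetD pref ((lo : Nat) : Int) 0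
    let best' := if cum > best then cum else best
    if Logic && (PySem.List.pyGetD people_list ((lo : Nat) : Int) 0 == PySem.List.pyGetD people_list k 0) then best'
    else pvLoopB locate_list people_list pref distance k Logic best' j

def getting_alt (locate_list : List Int) (people_list : List Int) (distance : Int) (k : Int) (Logic : Bool) : Int :=
  pvLoopB locate_list people_list (pvPref people_list) distance k Logic 0 (people_list.length - 1)

-- ===== PRECONDITION & SPEC =====
-- Pre_ excludes exactly the inputs on which Python A raises IndexError: with at least two people,
-- locate_list must cover every people index and, when Logic is true, k must be a valid Python index.
def Pre_getting (locate_list : List Int) (people_list : List Int) (distance : Int) (k : Int) (Logic : Bool) : Prop :=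
  (2 ≤ people_list.length → people_list.length ≤ locate_list.length) ∧
  (Logic = true → 2 ≤ people_list.length → (-(people_list.length : Int) ≤ k ∧ k < (people_list.length : Int)))
instance (locate_list : List Int) (people_list : List Int) (distance : Int) (k : Int) (Logic : Bool) : Decidable (Pre_getting locate_list people_list distance k Logic) := by unfold Pre_getting; infer_instance

def pvWitness_getting : List Int × List Int × Int × Int × Bool := ([0, 1], [3, 4], 1, 0, true)

def Spec_getting (locate_list : List Int) (people_list : List Int) (distance : Int) (k : Int) (Logic : Bool) (out : Int) : Prop := out = getting_alt locate_list people_list distance k Logic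
instance (locate_list : List Int) (people_list : List Int) (distance : Int) (k : Int) (Logic : Bool) (out : Int) : Decidable (Spec_getting locate_list people_list distance k Logic out) := by unfold Spec_getting; infer_instance

-- ===== CLAIM (what is proved, stated in full; the proofs are below) =====
def Claim_equal_getting : Prop := ∀ (locate_list : List Int) (people_list : List Int) (distance : Int) (k : Int) (Logic : Bool), Dom_getting locate_list people_list distance k Logic → Pre_getting locate_list people_list distance k Logic → Spec_getting locate_list people_list distance k Logic (getting locate_list people_list distance k Logic)

-- ===== LEMMAS AND PROOFS =====
-- prefix sums as a function
def pvPSum (people_list : List Int) (i : Nat) : Int := ((people_list.take i).sum)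

-- the running list built by pvPref's fold, characterized recursively
def pvSums : List Int → Int → List Int
  | [], _ => []
  | p :: ps, s => (s + p) :: pvSums ps (s + p)

theorem pvPref_fold (ps : List Int) : ∀ (pr : List Int) (s : Int),
    ps.foldl (fun st p => (st.1 ++ [st.2 + p], st.2 + p)) (pr, s) = (pr ++ pvSums ps s, s + ps.sum) := by
  induction ps with
  | nil => intro pr s; simp [pvSums]
  | cons p ps ih =>
    intro pr s
    simp only [List.foldl_cons, pvSums]
    rw [ih]
    simp [List.append_assoc]; ring

theorem pvSums_getD (ps : List Int) : ∀ (s : Int) (i : Nat), i < ps.length →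
    (pvSums ps s).getD i 0 = s + pvPSum ps (i + 1) := by
  induction ps with
  | nil => intro s i h; simp at h
  | cons p ps ih =>
    intro s i h
    cases i with
    | zero => simp [pvSums, pvPSum]
    | succ i =>
      simp only [pvSums, List.getD_cons_succ]
      rw [ih (s + p) i (by simpa using h)]
      simp [pvPSum]; ring

theorem pvPref_getD (people_list : List Int) (i : Nat) (h : i ≤ people_list.length) :
    PySem.List.pyGetD (pvPref people_list) ((i : Nat) : Int) 0 = pvPSum people_list i := by
  unfold pvPref
  rw [pvPref_fold]
  simp only [PySem.List.pyGetD_natCast]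
  cases i with
  | zero => simp [pvPSum]
  | succ i =>
    simp only [List.cons_append, List.nil_append, List.getD_cons_succ]
    rw [pvSums_getD people_list 0 i (by omega)]
    simp

theorem pvPSum_succ (ps : List Int) (i : Nat) (h : i < ps.length) :
    pvPSum ps (i + 1) = pvPSum ps i + ps.getD i 0 := by
  unfold pvPSum
  rw [List.take_succ, List.getElem?_eq_getElem h, Option.toList_some, List.sum_append,
    List.sum_cons, List.sum_nil, List.getD_eq_getElem _ _ h]
  ring

theorem pvFindLo_le (locate_list : List Int) (thresh : Int) : ∀ j, pvFindLo locate_list thresh j ≤ j := by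
  intro j
  induction j with
  | zero => simp [pvFindLo]
  | succ j ih =>
    unfold pvFindLo
    split
    · omega
    · omega

-- the inner while loop computed by the window start + prefix sums
theorem pvWhileA_eq (locate_list people_list : List Int) (lj d : Int) :
    ∀ (j : Nat) (cum : Int), j + 1 ≤ people_list.length →
    pvWhileA locate_list people_list lj d cum j =
      (cum + (pvPSum people_list (j + 1) - pvPSum people_list (pvFindLo locate_list (lj - 2 * d) (j + 1))),
       ((pvFindLo locate_list (lj - 2 * d) (j + 1) : Nat) : Int) - 1) := by
  intro j
  induction j with
  | zero =>
    intro cum h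
    have h0 := pvPSum_succ people_list 0 (by omega)
    rw [pvWhileA]
    by_cases hc : PySem.List.pyGetD locate_list ((0 : Nat) : Int) 0 ≥ lj - 2 * d
    · rw [if_pos (by omega)]
      have hfl : pvFindLo locate_list (lj - 2 * d) (0 + 1) = 0 := by
        rw [pvFindLo, if_pos (by simpa using hc), pvFindLo]
      rw [hfl, Prod.mk.injEq]
      refine ⟨?_, by omega⟩
      simp only [PySem.List.pyGetD_natCast]
      omega
    · rw [if_neg (by omega)]
      have hfl : pvFindLo locate_list (lj - 2 * d) (0 + 1) = 0 + 1 := by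
        unfold pvFindLo
        rw [if_neg (by simpa using hc)]
      rw [hfl, Prod.mk.injEq]
      refine ⟨by omega, by omega⟩
  | succ m ih =>
    intro cum h
    have hs := pvPSum_succ people_list (m + 1) (by omega)
    rw [pvWhileA]
    by_cases hc : PySem.List.pyGetD locate_list ((m + 1 : Nat) : Int) 0 ≥ lj - 2 * d
    · rw [if_pos (by omega)]
      have hfl : pvFindLo locate_list (lj - 2 * d) (m + 1 + 1) = pvFindLo locate_list (lj - 2 * d) (m + 1) := by
        conv_lhs => rw [pvFindLo]
        rw [if_pos (by simpa using hc)]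
      rw [ih _ (by omega), hfl, Prod.mk.injEq]
      refine ⟨?_, rfl⟩
      simp only [PySem.List.pyGetD_natCast] at hs ⊢
      omega
    · rw [if_neg (by omega)]
      have hfl : pvFindLo locate_list (lj - 2 * d) (m + 1 + 1) = m + 1 + 1 := by
        conv_lhs => rw [pvFindLo]
        rw [if_neg (by simpa using hc)]
      rw [hfl, Prod.mk.injEq]
      refine ⟨by omega, by omega⟩

-- outer loops agree (Logic = true)
theorem pvLoopT_eq (locate_list people_list : List Int) (d k : Int) :
    ∀ (j : Nat) (Max : Int), j ≤ people_list.length - 1 →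
    pvLoopT locate_list people_list d k Max j =
      pvLoopB locate_list people_list (pvPref people_list) d k true Max j := by
  intro j
  induction j with
  | zero => intro Max h; simp [pvLoopT, pvLoopB]
  | succ j ih =>
    intro Max h
    have hlole : pvFindLo locate_list (PySem.List.pyGetD locate_list ((j + 1 : Nat) : Int) 0 - 2 * d) (j + 1) ≤ j + 1 :=
      pvFindLo_le _ _ _
    have hs : pvPSum people_list (j + 2) = pvPSum people_list (j + 1) + people_list.getD (j + 1) 0 :=
      pvPSum_succ people_list (j + 1) (by omega)
    have hcum : PySem.List.pyGetD people_list ((j + 1 : Nat) : Int) 0 +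
        (pvPSum people_list (j + 1) -
          pvPSum people_list (pvFindLo locate_list (PySem.List.pyGetD locate_list ((j + 1 : Nat) : Int) 0 - 2 * d) (j + 1))) =
        PySem.List.pyGetD (pvPref people_list) ((j + 2 : Nat) : Int) 0 -
          PySem.List.pyGetD (pvPref people_list)
            ((pvFindLo locate_list (PySem.List.pyGetD locate_list ((j + 1 : Nat) : Int) 0 - 2 * d) (j + 1) : Nat) : Int) 0 := by
      rw [pvPref_getD _ _ (by omega), pvPref_getD _ _ (by omega)]
      simp only [PySem.List.pyGetD_natCast]
      omega
    have hidx : ∀ z : Int, z - 1 + 1 = z := fun z => by ring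
    simp only [pvLoopT, pvLoopB,
      pvWhileA_eq locate_list people_list (PySem.List.pyGetD locate_list ((j + 1 : Nat) : Int) 0) d j _ (by omega),
      hcum, hidx, Bool.true_and]
    split_ifs
    all_goals first | rfl | exact ih _ (by omega)

-- outer loops agree (Logic = false)
theorem pvLoopF_eq (locate_list people_list : List Int) (d k : Int) :
    ∀ (j : Nat) (Max : Int), j ≤ people_list.length - 1 →
    pvLoopF locate_list people_list d Max j =
      pvLoopB locate_list people_list (pvPref people_list) d k false Max j := by
  intro j
  induction j with
  | zero => intro Max h; simp [pvLoopF, pvLoopB]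
  | succ j ih =>
    intro Max h
    have hlole : pvFindLo locate_list (PySem.List.pyGetD locate_list ((j + 1 : Nat) : Int) 0 - 2 * d) (j + 1) ≤ j + 1 :=
      pvFindLo_le _ _ _
    have hs : pvPSum people_list (j + 2) = pvPSum people_list (j + 1) + people_list.getD (j + 1) 0 :=
      pvPSum_succ people_list (j + 1) (by omega)
    have hcum : PySem.List.pyGetD people_list ((j + 1 : Nat) : Int) 0 +
        (pvPSum people_list (j + 1) -
          pvPSum people_list (pvFindLo locate_list (PySem.List.pyGetD locate_list ((j + 1 : Nat) : Int) 0 - 2 * d) (j + 1))) =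
        PySem.List.pyGetD (pvPref people_list) ((j + 2 : Nat) : Int) 0 -
          PySem.List.pyGetD (pvPref people_list)
            ((pvFindLo locate_list (PySem.List.pyGetD locate_list ((j + 1 : Nat) : Int) 0 - 2 * d) (j + 1) : Nat) : Int) 0 := by
      rw [pvPref_getD _ _ (by omega), pvPref_getD _ _ (by omega)]
      simp only [PySem.List.pyGetD_natCast]
      omega
    simp only [pvLoopF, pvLoopB,
      pvWhileA_eq locate_list people_list (PySem.List.pyGetD locate_list ((j + 1 : Nat) : Int) 0) d j _ (by omega),
      hcum, Bool.false_and, Bool.false_eq_true, if_false]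
    exact ih _ (by omega)

theorem getting_eq_alt (locate_list people_list : List Int) (distance k : Int) (Logic : Bool) :
    getting locate_list people_list distance k Logic = getting_alt locate_list people_list distance k Logic := by
  unfold getting getting_alt
  cases Logic with
  | true => simpa using pvLoopT_eq locate_list people_list distance k (people_list.length - 1) 0 (le_refl _)
  | false => simpa using pvLoopF_eq locate_list people_list distance k (people_list.length - 1) 0 (le_refl _)

-- ===== VERDICT (by name: the statement is the Claim_ definition above) =====
theorem getting_spec : Claim_equal_getting := by
  intro locate_list people_list distance k Logic _ _
  show getting locate_list people_list distance k Logic = getting_alt locate_list people_list distance k Logic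
  exact getting_eq_alt locate_list people_list distance k Logic
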